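-- pv_equiv track=rewrite | github.com/NathanCheshire/advent-of-code-2023 | day11/solution.py | sum_distances
-- ===== SOURCE A (Python) =====
-- def sum_distances(distances: list[int]) -> int:
--     """
--     Calculate the sum of distances between pairs of points.
--     """
--     total_distance = 0
--     num_distances = len(distances)
--
--     for i in range(num_distances - 1):
--         deviation = distances[i + 1] - distances[i]
--         multiplier = (i + 1) * (num_distances - (i + 1))
--         total_distance += multiplier * deviation
--
--     return total_distance
-- ===== SOURCE B (Python) =====
-- def sum_distances(distances: list[int]) -> int:
--     """
--     Calculate the sum of distances between pairs of points.
--     """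
--     n = len(distances)
--     total = 0
--     for i, d in enumerate(distances):
--         total += d * (2 * i - (n - 1))
--     return total
-- ===== Notes on version B (the rewrite author's own statement) =====
-- stated objective: simpler
-- what changed: Replaces the consecutive-difference pass with multiplier (i+1)*(n-(i+1)) by a direct closed-form weighting of each element: total += d * (2*i - (n-1)) over enumerate(distances), with no neighbor indexing.
import Mathlib
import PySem

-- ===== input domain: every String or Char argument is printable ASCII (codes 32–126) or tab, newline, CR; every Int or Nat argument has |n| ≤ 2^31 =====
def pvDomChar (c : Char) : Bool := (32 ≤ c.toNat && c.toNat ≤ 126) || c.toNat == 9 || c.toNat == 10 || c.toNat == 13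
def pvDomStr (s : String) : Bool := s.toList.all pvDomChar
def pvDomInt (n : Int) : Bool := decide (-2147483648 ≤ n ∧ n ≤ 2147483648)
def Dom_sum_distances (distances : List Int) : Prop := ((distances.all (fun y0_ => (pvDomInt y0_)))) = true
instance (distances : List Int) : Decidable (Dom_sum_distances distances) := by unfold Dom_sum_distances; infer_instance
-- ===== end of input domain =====

-- B replaces A's weighted consecutive-difference pass by a closed-form per-element weighting (simpler; same O(n) cost).

-- ===== PORT A =====
-- literal port of A: for i in range(n-1): total += (i+1)*(n-(i+1)) * (distances[i+1]-distances[i]);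
-- the pyGetD default 0 is never used: both indices are always in range, so this is exact.
def sum_distances (distances : List Int) : Int :=
  let num : Nat := distances.length
  (PySem.List.pyRange 0 ((num : Int) - 1) 1).foldl
    (fun total i =>
      total + ((i + 1) * ((num : Int) - (i + 1))) *
        (PySem.List.pyGetD distances (i + 1) 0 - PySem.List.pyGetD distances i 0)) 0

-- ===== PORT B =====
-- literal port of Source B: for i, d in enumerate(distances): total += d * (2*i - (n-1))
def sum_distances_alt (distances : List Int) : Int :=
  let n : Nat := distances.length
  (PySem.List.enumerate distances).foldl
    (fun total p => total + p.2 * (2 * p.1 - ((n : Int) - 1))) 0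

-- ===== PRECONDITION & SPEC =====
def Spec_sum_distances (distances : List Int) (out : Int) : Prop := out = sum_distances_alt distances
instance (distances : List Int) (out : Int) : Decidable (Spec_sum_distances distances out) := by unfold Spec_sum_distances; infer_instance

-- ===== CLAIM (what is proved, stated in full; the proofs are below) =====
def Claim_equal_sum_distances : Prop := ∀ (distances : List Int), Dom_sum_distances distances → Spec_sum_distances distances (sum_distances distances)

-- ===== LEMMAS AND PROOFS =====

-- B's fold over zipIdx, generalized over the start index and the accumulator.
theorem foldB_eq_sum (l : List Int) (c : Int) :
    ∀ (k : Nat) (acc : Int),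
      (l.zipIdx k).foldl (fun total p => total + p.1 * (2 * (p.2 : Int) - c)) acc
        = acc + ∑ i ∈ Finset.range l.length, l.getD i 0 * (2 * ((i : Int) + (k : Int)) - c) := by
  induction l with
  | nil => simp
  | cons d r ih =>
    intro k acc
    rw [List.zipIdx_cons, List.foldl_cons, ih (k + 1)]
    rw [List.length_cons, Finset.sum_range_succ']
    simp only [List.getD_cons_succ, List.getD_cons_zero]
    push_cast
    ring_nf

-- A's range fold as a Finset sum over the first m indices (length = m + 1).
theorem foldA_eq_sum (l : List Int) (m : Nat) (hm : l.length = m + 1) :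
    sum_distances l
      = ∑ i ∈ Finset.range m,
          ((i : Int) + 1) * ((m : Int) - (i : Int)) * (l.getD (i + 1) 0 - l.getD i 0) := by
  simp only [sum_distances, hm]
  have hb : (((m + 1 : Nat)) : Int) - 1 = ((m : Nat) : Int) := by push_cast; ring
  rw [hb, PySem.List.pyRange_zero_natCast, PySem.List.foldl_add, List.map_map, zero_add]
  have hlist : ∀ (F : Nat → Int), ((List.range m).map F).sum = ∑ i ∈ Finset.range m, F i :=
    fun F => rfl
  rw [hlist]
  refine Finset.sum_congr rfl (fun i _ => ?_)
  simp only [Function.comp]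
  have h1 : ((i : Int) + 1) = ((i + 1 : Nat) : Int) := by push_cast; ring
  rw [h1, PySem.List.pyGetD_natCast, PySem.List.pyGetD_natCast]
  push_cast
  ring

-- Telescoping helper (summation by parts, inner step).
theorem telescope_weighted (g : Nat → Int) (m : Nat) :
    ∑ i ∈ Finset.range m, ((i : Int) + 1) * (g (i + 1) - g i)
      = (m : Int) * g m - ∑ i ∈ Finset.range m, g i := by
  induction m with
  | zero => simp
  | succ m ih =>
    rw [Finset.sum_range_succ, ih, Finset.sum_range_succ]
    push_cast
    ring

-- Abel summation identity: holds for every g : Nat → Int.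
theorem abel_identity (g : Nat → Int) (m : Nat) :
    ∑ i ∈ Finset.range m, ((i : Int) + 1) * ((m : Int) - (i : Int)) * (g (i + 1) - g i)
      = ∑ i ∈ Finset.range (m + 1), g i * (2 * (i : Int) - (m : Int)) := by
  induction m with
  | zero => simp
  | succ m ih =>
    have h2 : ∑ i ∈ Finset.range m, ((i : Int) + 1) * (((m : Int) + 1) - (i : Int)) * (g (i + 1) - g i)
        = (∑ i ∈ Finset.range m, ((i : Int) + 1) * ((m : Int) - (i : Int)) * (g (i + 1) - g i))
          + ∑ i ∈ Finset.range m, ((i : Int) + 1) * (g (i + 1) - g i) := by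
      rw [← Finset.sum_add_distrib]
      exact Finset.sum_congr rfl (fun i _ => by ring)
    have h5 : ∑ i ∈ Finset.range (m + 1), g i * (2 * (i : Int) - ((m : Int) + 1))
        = (∑ i ∈ Finset.range (m + 1), g i * (2 * (i : Int) - (m : Int)))
          - ∑ i ∈ Finset.range (m + 1), g i := by
      rw [← Finset.sum_sub_distrib]
      exact Finset.sum_congr rfl (fun i _ => by ring)
    rw [Finset.sum_range_succ]
    push_cast
    rw [h2, telescope_weighted g m, ih,
      Finset.sum_range_succ (fun i => g i * (2 * (i : Int) - ((m : Int) + 1))), h5,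
      Finset.sum_range_succ (fun i => g i)]
    push_cast
    ring

-- ===== VERDICT (by name: the statement is the Claim_ definition above) =====
theorem sum_distances_spec : Claim_equal_sum_distances := by
  intro l _
  unfold Spec_sum_distances
  cases hl : l.length with
  | zero =>
    have hnil : l = [] := List.length_eq_zero_iff.mp hl
    subst hnil
    rfl
  | succ m =>
    rw [foldA_eq_sum l m hl, abel_identity (fun i => l.getD i 0) m]
    simp only [sum_distances_alt, PySem.List.enumerate_eq_zipIdx_map, List.foldl_map, zero_add]
    rw [foldB_eq_sum l ((l.length : Int) - 1) 0 0, zero_add, hl]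
    refine Finset.sum_congr rfl (fun i _ => ?_)
    push_cast
    ring
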